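-- pv_equiv track=rewrite | github.com/freyasheth/ai-project | main.py | path_to_state_action_pairs
-- ===== SOURCE A (Python) =====
-- ACTION_DICT = {'up': (-1, 0), 'down': (1, 0), 'left': (0, -1), 'right': (0, 1)}
--
-- def path_to_state_action_pairs(path):
--     pairs = []
--     for i in range(len(path) - 1):
--         state = path[i]
--         next_state = path[i + 1]
--         for action, delta in ACTION_DICT.items():
--             if (state[0] + delta[0], state[1] + delta[1]) == next_state:
--                 pairs.append((state, action))
--                 break
--     return pairs
-- ===== SOURCE B (Python) =====
-- def path_to_state_action_pairs(path):
--     # Recursive pairwise traversal; the action is decided by arithmetic on the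
--     # delta (dr*dr + dc*dc == 1 characterises the four unit moves), no dict at all.
--     def step(s, n):
--         dr = n[0] - s[0]
--         dc = n[1] - s[1]
--         if dr * dr + dc * dc != 1:
--             return None
--         if dr != 0:
--             return 'down' if dr == 1 else 'up'
--         return 'right' if dc == 1 else 'left'
--
--     def go(rest):
--         if len(rest) < 2:
--             return []
--         a = step(rest[0], rest[1])
--         tail = go(rest[1:])
--         return [(rest[0], a)] + tail if a is not None else tail
--
--     return go(path)
-- ===== Notes on version B (the rewrite author's own statement) =====
-- stated objective: alternative
-- what changed: Removes ACTION_DICT entirely: a recursive pairwise traversal classifies each step by arithmetic on the delta (dr*dr+dc*dc==1 picks out the four unit moves, signs pick the name) instead of A's index loop scanning a 4-entry dict with break.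
import Mathlib
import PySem

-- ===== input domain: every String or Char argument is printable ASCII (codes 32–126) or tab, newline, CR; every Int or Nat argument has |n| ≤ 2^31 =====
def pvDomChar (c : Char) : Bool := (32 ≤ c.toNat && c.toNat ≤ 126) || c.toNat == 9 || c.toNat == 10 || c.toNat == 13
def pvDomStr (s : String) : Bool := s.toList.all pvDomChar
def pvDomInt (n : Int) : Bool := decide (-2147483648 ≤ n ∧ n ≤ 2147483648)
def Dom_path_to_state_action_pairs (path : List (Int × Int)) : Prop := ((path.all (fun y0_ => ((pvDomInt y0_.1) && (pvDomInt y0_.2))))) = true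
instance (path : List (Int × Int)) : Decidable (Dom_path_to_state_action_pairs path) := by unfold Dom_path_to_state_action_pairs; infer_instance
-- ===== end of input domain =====

-- B drops ACTION_DICT: a recursive pairwise traversal classifies each step by
-- arithmetic on the delta instead of A's index loop scanning a 4-entry dict (objective: alternative).

-- ===== PORT A =====
-- ACTION_DICT.items() in insertion order
def actionItems : List (String × (Int × Int)) :=
  [("up", (-1, 0)), ("down", (1, 0)), ("left", (0, -1)), ("right", (0, 1))]

-- the inner 'for action, delta in ACTION_DICT.items(): … break' loop
def findActionA (state next_state : Int × Int) : List (String × (Int × Int)) → Option String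
  | [] => none
  | (action, delta) :: rest =>
      if (state.1 + delta.1, state.2 + delta.2) = next_state then some action
      else findActionA state next_state rest

def path_to_state_action_pairs (path : List (Int × Int)) : List ((Int × Int) × String) :=
  (PySem.List.pyRange 0 ((path.length : Int) - 1) 1).foldl
    (fun pairs i =>
      let state := PySem.List.pyGetD path i (0, 0)
      let next_state := PySem.List.pyGetD path (i + 1) (0, 0)
      match findActionA state next_state actionItems with
      | some action => pairs ++ [(state, action)]
      | none => pairs) []

-- ===== PORT B =====
-- step: classify the delta arithmetically (dr*dr + dc*dc = 1 ⇔ a unit move)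
def stepB (s n : Int × Int) : Option String :=
  let dr := n.1 - s.1
  let dc := n.2 - s.2
  if dr * dr + dc * dc ≠ 1 then none
  else if dr ≠ 0 then some (if dr = 1 then "down" else "up")
  else some (if dc = 1 then "right" else "left")

-- go: structural recursion over consecutive pairs
def path_to_state_action_pairs_alt : List (Int × Int) → List ((Int × Int) × String)
  | [] => []
  | [_] => []
  | s :: n :: rest =>
    match stepB s n with
    | some a => (s, a) :: path_to_state_action_pairs_alt (n :: rest)
    | none => path_to_state_action_pairs_alt (n :: rest)

-- ===== PRECONDITION & SPEC =====
def Spec_path_to_state_action_pairs (path : List (Int × Int)) (out : List ((Int × Int) × String)) : Prop := out = path_to_state_action_pairs_alt path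
instance (path : List (Int × Int)) (out : List ((Int × Int) × String)) : Decidable (Spec_path_to_state_action_pairs path out) := by unfold Spec_path_to_state_action_pairs; infer_instance

-- ===== CLAIM (what is proved, stated in full; the proofs are below) =====
def Claim_equal_path_to_state_action_pairs : Prop := ∀ (path : List (Int × Int)), Dom_path_to_state_action_pairs path → Spec_path_to_state_action_pairs path (path_to_state_action_pairs path)

-- ===== LEMMAS AND PROOFS =====

-- the two per-step decisions agree

-- dr² + dc² = 1 on ℤ forces a unit vector
theorem unit_of_sq (dr dc : Int) (h : dr * dr + dc * dc = 1) :
    (dr = 1 ∧ dc = 0) ∨ (dr = -1 ∧ dc = 0) ∨ (dr = 0 ∧ dc = 1) ∨ (dr = 0 ∧ dc = -1) := by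
  have hdr : dr * dr ≥ 0 := mul_self_nonneg dr
  have hdc : dc * dc ≥ 0 := mul_self_nonneg dc
  have hdr1 : dr * dr ≤ 1 := by omega
  have hdc1 : dc * dc ≤ 1 := by omega
  have hr1 : -1 ≤ dr := by nlinarith
  have hr2 : dr ≤ 1 := by nlinarith
  have hc1 : -1 ≤ dc := by nlinarith
  have hc2 : dc ≤ 1 := by nlinarith
  interval_cases dr <;> interval_cases dc <;> omega

theorem step_agree (s n : Int × Int) :
    findActionA s n actionItems = stepB s n := by
  obtain ⟨a, b⟩ := s
  obtain ⟨c, d⟩ := n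
  by_cases h1 : c = a - 1 ∧ d = b
  · obtain ⟨hc, hd⟩ := h1; subst hc; subst hd
    norm_num [findActionA, actionItems, stepB] <;>
        (intro h; exact absurd (by omega) h)
  · by_cases h2 : c = a + 1 ∧ d = b
    · obtain ⟨hc, hd⟩ := h2; subst hc; subst hd
      norm_num [findActionA, actionItems, stepB] <;>
        (intro h; exact absurd (by omega) h)
    · by_cases h3 : c = a ∧ d = b - 1
      · obtain ⟨hc, hd⟩ := h3; subst hc; subst hd
        norm_num [findActionA, actionItems, stepB] <;>
        (intro h; exact absurd (by omega) h)
      · by_cases h4 : c = a ∧ d = b + 1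
        · obtain ⟨hc, hd⟩ := h4; subst hc; subst hd
          norm_num [findActionA, actionItems, stepB] <;>
        (intro h; exact absurd (by omega) h)
        · have e1 : ¬(a + -1 = c ∧ b = d) := by omega
          have e2 : ¬(a + 1 = c ∧ b = d) := by omega
          have e3 : ¬(a = c ∧ b + -1 = d) := by omega
          have e4 : ¬(a = c ∧ b + 1 = d) := by omega
          have q1 : (c - a) * (c - a) + (d - b) * (d - b) ≠ 1 := by
            intro hq
            rcases unit_of_sq _ _ hq with ⟨x, y⟩ | ⟨x, y⟩ | ⟨x, y⟩ | ⟨x, y⟩ <;> omega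
          simp [findActionA, actionItems, stepB, e1, e2, e3, e4, q1]

-- the zip-foldl form of B's recursion, with explicit accumulator
theorem alt_foldl (l : List (Int × Int)) (acc : List ((Int × Int) × String)) :
    (l.zip l.tail).foldl
      (fun pairs sn =>
        match stepB sn.1 sn.2 with
        | some a => pairs ++ [(sn.1, a)]
        | none => pairs) acc
    = acc ++ path_to_state_action_pairs_alt l := by
  induction l generalizing acc with
  | nil => simp [path_to_state_action_pairs_alt]
  | cons s t ih =>
    cases t with
    | nil => simp [path_to_state_action_pairs_alt]
    | cons n rest =>
      simp only [List.tail_cons, List.zip_cons_cons, List.foldl_cons,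
        path_to_state_action_pairs_alt]
      simp only [List.tail_cons] at ih
      cases h : stepB s n
      · simp only [h]; exact ih acc
      · simp only [h]; rw [ih]; simp

theorem path_to_state_action_pairs_eq_alt (path : List (Int × Int)) :
    path_to_state_action_pairs path = path_to_state_action_pairs_alt path := by
  unfold path_to_state_action_pairs
  cases path with
  | nil => decide
  | cons x t =>
    have hrange : ((((x :: t).length : Int)) - 1)
        = ((((x :: t).zip (x :: t).tail).length : Int)) := by
      simp
    rw [hrange]
    have hbody : ∀ (pairs : List ((Int × Int) × String)) (i : Int),
        i ∈ PySem.List.pyRange 0 (((x :: t).zip (x :: t).tail).length : Int) 1 →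
        (let state := PySem.List.pyGetD (x :: t) i (0, 0)
         let next_state := PySem.List.pyGetD (x :: t) (i + 1) (0, 0)
         match findActionA state next_state actionItems with
         | some action => pairs ++ [(state, action)]
         | none => pairs)
        = (fun pairs sn =>
            match stepB sn.1 sn.2 with
            | some a => pairs ++ [(sn.1, a)]
            | none => pairs) pairs
            (PySem.List.pyGetD ((x :: t).zip (x :: t).tail) i ((0, 0), (0, 0))) := by
      intro pairs i hi
      rw [PySem.List.mem_pyRange_one] at hi
      obtain ⟨h0, h1⟩ := hi
      set ys := (x :: t).zip (x :: t).tail with hys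
      have hiys : i.toNat < ys.length := by omega
      have hip : i.toNat < (x :: t).length := by simp [hys, List.length_zip] at hiys ⊢; omega
      have hip1 : i.toNat + 1 < (x :: t).length := by simp [hys, List.length_zip] at hiys ⊢; omega
      have e1 : PySem.List.pyGetD (x :: t) i (0, 0) = (x :: t)[i.toNat] := by
        rw [PySem.List.pyGetD_eq_getElem] <;> omega
      have e2 : PySem.List.pyGetD (x :: t) (i + 1) (0, 0) = (x :: t)[i.toNat + 1] := by
        have : (i + 1).toNat = i.toNat + 1 := by omega
        rw [PySem.List.pyGetD_eq_getElem] <;> simp_all <;> omega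
      have e3 : PySem.List.pyGetD ys i ((0, 0), (0, 0)) = ys[i.toNat] := by
        rw [PySem.List.pyGetD_eq_getElem] <;> omega
      have e4 : ys[i.toNat] = ((x :: t)[i.toNat], (x :: t)[i.toNat + 1]) := by
        simp [hys, List.getElem_zip]
      simp only [e1, e2, e3, e4, step_agree]
    rw [PySem.List.foldl_congr_mem]
    · rw [PySem.List.foldl_pyRange_zero_pyGetD' ((x :: t).zip (x :: t).tail) ((0,0),(0,0)) _ []]
      exact alt_foldl (x :: t) []
    · intro acc i hi
      exact hbody acc i hi

-- ===== VERDICT (by name: the statement is the Claim_ definition above) =====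
theorem path_to_state_action_pairs_spec : Claim_equal_path_to_state_action_pairs := by
  intro path _
  unfold Spec_path_to_state_action_pairs
  exact path_to_state_action_pairs_eq_alt path
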